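-- pv_equiv track=rewrite | github.com/dora577/Carrillo-Lipman-Implementation | utils.py | generate_pairs
-- ===== SOURCE A (Python) =====
-- def generate_pairs(alignment):
--     sequence_ids = sorted(list(alignment.keys()))
--     pairs = set()
--     for i, seq_id1 in enumerate(sequence_ids):
--         for j, seq_id2  in enumerate(sequence_ids):
--             if i < j:
--                 for idx1, l_1 in enumerate(alignment[seq_id1]):
--                     for idx2, l_2 in enumerate(alignment[seq_id2]):
--                         if l_1 == l_2:
--                             pairs.add((seq_id1, idx1, seq_id2,idx2))
--     return pairs
-- ===== SOURCE B (Python) =====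
-- def generate_pairs(alignment):
--     seqs = [(sid, alignment[sid]) for sid in sorted(alignment)]
--     pairs = set()
--     while seqs:
--         (s1, seq1), seqs = seqs[0], seqs[1:]
--         for s2, seq2 in seqs:
--             pos = {}
--             for j, c in enumerate(seq2):
--                 pos.setdefault(c, []).append(j)
--             for i, c in enumerate(seq1):
--                 for j2 in pos.get(c, []):
--                     pairs.add((s1, i, s2, j2))
--     return pairs
-- ===== Notes on version B (the rewrite author's own statement) =====
-- stated objective: alternative
-- what changed: B builds the sorted (id, sequence) list once and consumes it front-to-back with a tail loop (recursion in the port) pairing each head against the remaining tail, and replaces A's quadratic character-by-character inner scan with a per-pair dictionary bucketing the second sequence's positions by character so matches are emitted directly.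
import Mathlib
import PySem

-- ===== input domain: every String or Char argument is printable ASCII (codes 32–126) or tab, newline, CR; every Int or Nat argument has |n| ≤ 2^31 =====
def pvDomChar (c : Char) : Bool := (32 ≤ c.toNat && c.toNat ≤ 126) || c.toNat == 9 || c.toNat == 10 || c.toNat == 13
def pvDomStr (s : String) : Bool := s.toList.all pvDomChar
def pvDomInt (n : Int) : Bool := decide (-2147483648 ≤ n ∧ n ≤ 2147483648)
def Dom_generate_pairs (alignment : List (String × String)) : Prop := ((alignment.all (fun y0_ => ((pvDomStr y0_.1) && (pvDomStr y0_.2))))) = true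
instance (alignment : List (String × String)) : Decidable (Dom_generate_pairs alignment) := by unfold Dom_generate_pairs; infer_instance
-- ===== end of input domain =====

-- B pairs each sequence with the tail of a sorted (id, sequence) list consumed front-to-back, and replaces A's
-- quadratic character-by-character inner scan with per-pair buckets of positions keyed by character (alternative algorithm).

-- ===== PORT A =====
def generate_pairs (alignment : List (String × String)) : List (String × Int × String × Int) :=
  let d := PySem.Dict.mk alignment
  let sequence_ids := PySem.List.sorted d.keys (fun x => x) false
  (PySem.List.enumerate sequence_ids 0).foldl (fun pairs p1 =>
    (PySem.List.enumerate sequence_ids 0).foldl (fun pairs p2 =>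
      if p1.1 < p2.1 then
        (PySem.List.enumerate (d.getD p1.2 "").toList 0).foldl (fun pairs q1 =>
          (PySem.List.enumerate (d.getD p2.2 "").toList 0).foldl (fun pairs q2 =>
            if q1.2 == q2.2 then PySem.Set.add pairs (p1.2, q1.1, p2.2, q2.1) else pairs)
          pairs)
        pairs
      else pairs)
    pairs)
  []

-- ===== PORT B =====
-- positions of each character of s, bucketed by character (Python: the pos.setdefault loop)
def pvBucketChars (s : String) : PySem.Dict Char (List Int) :=
  (PySem.List.enumerate s.toList 0).foldl
    (fun pos q => pos.modify q.2 ([] : List Int) (· ++ [q.1])) PySem.Dict.empty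

-- one head row: emit matches of seq1 against every remaining (s2, seq2) via the buckets
def pvEmitRow (s1 : String) (seq1 : String) (rest : List (String × String))
    (pairs : List (String × Int × String × Int)) : List (String × Int × String × Int) :=
  rest.foldl (fun pairs r =>
    let pos := pvBucketChars r.2
    (PySem.List.enumerate seq1.toList 0).foldl (fun pairs q =>
      (pos.getD q.2 []).foldl (fun pairs j2 => PySem.Set.add pairs (s1, q.1, r.1, j2)) pairs)
      pairs) pairs

-- the while-loop of Source B: consume the (id, sequence) list front-to-back
def pvRowsB : List (String × String) → List (String × Int × String × Int) → List (String × Int × String × Int)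
  | [], pairs => pairs
  | (s1, seq1) :: rest, pairs => pvRowsB rest (pvEmitRow s1 seq1 rest pairs)

def generate_pairs_alt (alignment : List (String × String)) : List (String × Int × String × Int) :=
  let d := PySem.Dict.mk alignment
  let seqs := (PySem.List.sorted d.keys (fun x => x) false).map (fun sid => (sid, d.getD sid ""))
  pvRowsB seqs []

-- ===== PRECONDITION & SPEC =====
def Spec_generate_pairs (alignment : List (String × String)) (out : List (String × Int × String × Int)) : Prop := out = generate_pairs_alt alignment
instance (alignment : List (String × String)) (out : List (String × Int × String × Int)) : Decidable (Spec_generate_pairs alignment out) := by unfold Spec_generate_pairs; infer_instance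

-- ===== CLAIM (what is proved, stated in full; the proofs are below) =====
def Claim_equal_generate_pairs : Prop := ∀ (alignment : List (String × String)), Dom_generate_pairs alignment → Spec_generate_pairs alignment (generate_pairs alignment)

-- ===== LEMMAS AND PROOFS =====

-- generic tail recursion over a list of ids, used to relate both ports
def pvRowsRec {S : Type} (Q : String → String → S → S) : List String → S → S
  | [], acc => acc
  | x :: xs, acc => pvRowsRec Q xs (xs.foldl (fun a y => Q x y a) acc)

-- 'if p(x): acc = g(acc, h(x))' over a list is a fold of g over the filtered-and-mapped list
theorem pv_foldl_if_map_filter {α β S : Type} (l : List α) (p : α → Prop) [DecidablePred p]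
    (h : α → β) (g : S → β → S) (acc : S) :
    l.foldl (fun a x => if p x then g a (h x) else a) acc
      = ((l.filter (fun x => decide (p x))).map h).foldl g acc := by
  induction l generalizing acc with
  | nil => rfl
  | cons x xs ih => by_cases hp : p x <;> simp [hp, ih]

-- the elements of enumerate l s with index > s + k are exactly l.drop (k+1)
theorem pv_enum_filter_lt_map_snd {α : Type} (l : List α) (s : Int) (k : Nat) :
    (((PySem.List.enumerate l s).filter (fun p => decide (s + (k : Int) < p.1))).map (·.2))
      = l.drop (k + 1) := by
  induction l generalizing s k with
  | nil => simp [PySem.List.enumerate_nil]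
  | cons x xs ih =>
    rw [PySem.List.enumerate_cons]
    cases k with
    | zero =>
      have hall : (PySem.List.enumerate xs (s + 1)).filter (fun p => decide (s < p.1))
          = PySem.List.enumerate xs (s + 1) := by
        apply List.filter_eq_self.mpr
        intro p hp
        rcases (PySem.List.mem_enumerate_iff _ _ _).1 hp with ⟨m, hm, rfl⟩
        simp; omega
      simp [hall, PySem.List.map_snd_enumerate]
    | succ k' =>
      have h1 : ¬ (s + ((k' + 1 : Nat) : Int) < s) := by push_cast; omega
      have h2 : (fun (p : Int × α) => decide (s + ((k' + 1 : Nat) : Int) < p.1))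
          = (fun (p : Int × α) => decide ((s + 1) + (k' : Int) < p.1)) := by
        funext p
        rw [show s + ((k' + 1 : Nat) : Int) = (s + 1) + (k' : Int) by push_cast; ring]
      simp only [List.filter_cons, decide_eq_true_eq, h1, if_false]
      rw [h2, ih]
      simp

-- A's j-filtered scan over enumerate equals a plain scan of the tail l.drop (k+1)
theorem pv_outer {S : Type} (ids : List String) (G : S → String → S) (k : Nat) (acc : S) :
    (PySem.List.enumerate ids 0).foldl
        (fun a p2 => if (0 : Int) + (k : Int) < p2.1 then G a p2.2 else a) acc
      = (ids.drop (k + 1)).foldl G acc := by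
  rw [pv_foldl_if_map_filter (PySem.List.enumerate ids 0)
        (fun p2 => (0 : Int) + (k : Int) < p2.1) (·.2) G acc,
      pv_enum_filter_lt_map_snd ids 0 k]

-- the inner double scan of A equals B's bucket emission, for any accumulator
theorem pv_inner_eq (s1 s2 : String) (l1 l2 : List Char)
    (acc : List (String × Int × String × Int)) :
    (PySem.List.enumerate l1 0).foldl (fun pairs q1 =>
        (PySem.List.enumerate l2 0).foldl (fun pairs q2 =>
          if q1.2 == q2.2 then PySem.Set.add pairs (s1, q1.1, s2, q2.1) else pairs) pairs) acc
    = (PySem.List.enumerate l1 0).foldl (fun pairs q1 =>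
        (((PySem.List.enumerate l2 0).foldl
            (fun b q => b.modify q.2 ([] : List Int) (· ++ [q.1])) PySem.Dict.empty).getD q1.2 []).foldl
          (fun pairs i2 => PySem.Set.add pairs (s1, q1.1, s2, i2)) pairs) acc := by
  apply PySem.List.foldl_congr_mem
  intro pacc q1 _
  have hb : ((PySem.List.enumerate l2 0).foldl
        (fun b q => b.modify q.2 ([] : List Int) (· ++ [q.1])) PySem.Dict.empty).getD q1.2 []
      = (((PySem.List.enumerate l2 0).map Prod.swap).filter (fun p => p.1 == q1.2)).map (·.2) := by
    have h0 : (PySem.List.enumerate l2 0).foldl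
          (fun b q => b.modify q.2 ([] : List Int) (· ++ [q.1])) PySem.Dict.empty
        = ((PySem.List.enumerate l2 0).map Prod.swap).foldl
          (fun d p => d.modify p.1 ([] : List Int) (· ++ [p.2])) PySem.Dict.empty := by
      rw [List.foldl_map]
      rfl
    rw [h0, PySem.Dict.getD_foldl_modify_append]
    simp [PySem.Dict.getD_empty]
  rw [hb]
  rw [pv_foldl_if_map_filter (PySem.List.enumerate l2 0)
    (fun q2 => (q1.2 == q2.2) = true) (·.1) (fun pairs i2 => PySem.Set.add pairs (s1, q1.1, s2, i2)) pacc]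
  congr 1
  rw [List.filter_map, List.map_map]
  apply congrArg
  apply List.filter_congr
  intro q2 _
  cases q2 with
  | mk i c => simp only [Bool.decide_coe]; exact Bool.beq_comm

-- A's inner pair body, as a function of the two sequence ids
def pvQA (d : PySem.Dict String String) (x y : String)
    (pairs : List (String × Int × String × Int)) : List (String × Int × String × Int) :=
  (PySem.List.enumerate (d.getD x "").toList 0).foldl (fun pairs q1 =>
    (PySem.List.enumerate (d.getD y "").toList 0).foldl (fun pairs q2 =>
      if q1.2 == q2.2 then PySem.Set.add pairs (x, q1.1, y, q2.1) else pairs)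
    pairs) pairs

-- B's inner pair body, after fusing the map into the fold
def pvQB (d : PySem.Dict String String) (x y : String)
    (pairs : List (String × Int × String × Int)) : List (String × Int × String × Int) :=
  (PySem.List.enumerate (d.getD x "").toList 0).foldl (fun pairs q =>
    ((pvBucketChars (d.getD y "")).getD q.2 []).foldl
      (fun pairs j2 => PySem.Set.add pairs (x, q.1, y, j2)) pairs) pairs

-- a fold over drops of the enumerated suffix is the tail recursion pvRowsRec
theorem pv_drop_fold_rows {S : Type} (Q : String → String → S → S) (ids0 : List String) :
    ∀ (l : List String) (s : Nat) (acc : S), ids0.drop s = l →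
    (PySem.List.enumerate l (s : Int)).foldl
        (fun a p1 => (ids0.drop (p1.1.toNat + 1)).foldl (fun a' y => Q p1.2 y a') a) acc
      = pvRowsRec Q l acc := by
  intro l
  induction l with
  | nil => intro s acc _; simp [PySem.List.enumerate_nil, pvRowsRec]
  | cons x xs ih =>
    intro s acc hdrop
    rw [PySem.List.enumerate_cons]
    have hxs : ids0.drop (s + 1) = xs := by
      have := congrArg List.tail hdrop
      simpa [List.tail_drop] using this
    have hcast : ((s : Int)).toNat = s := by simp
    simp only [List.foldl_cons, pvRowsRec]
    rw [show ((s : Int) + 1) = ((s + 1 : Nat) : Int) by push_cast; ring]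
    rw [ih (s + 1) _ hxs]
    congr 1
    simp [hcast, hxs]

-- A's nested enumerate-with-filter fold is the tail recursion with body pvQA
theorem pv_A_rows (d : PySem.Dict String String) (ids : List String)
    (acc : List (String × Int × String × Int)) :
    (PySem.List.enumerate ids 0).foldl (fun pairs p1 =>
      (PySem.List.enumerate ids 0).foldl (fun pairs p2 =>
        if p1.1 < p2.1 then
          (PySem.List.enumerate (d.getD p1.2 "").toList 0).foldl (fun pairs q1 =>
            (PySem.List.enumerate (d.getD p2.2 "").toList 0).foldl (fun pairs q2 =>
              if q1.2 == q2.2 then PySem.Set.add pairs (p1.2, q1.1, p2.2, q2.1) else pairs)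
            pairs)
          pairs
        else pairs)
      pairs) acc
    = pvRowsRec (pvQA d) ids acc := by
  have h1 : (PySem.List.enumerate ids 0).foldl (fun pairs p1 =>
      (PySem.List.enumerate ids 0).foldl (fun pairs p2 =>
        if p1.1 < p2.1 then
          (PySem.List.enumerate (d.getD p1.2 "").toList 0).foldl (fun pairs q1 =>
            (PySem.List.enumerate (d.getD p2.2 "").toList 0).foldl (fun pairs q2 =>
              if q1.2 == q2.2 then PySem.Set.add pairs (p1.2, q1.1, p2.2, q2.1) else pairs)
            pairs)
          pairs
        else pairs)
      pairs) acc
      = (PySem.List.enumerate ids 0).foldl (fun pairs p1 =>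
          (ids.drop (p1.1.toNat + 1)).foldl (fun a' y => pvQA d p1.2 y a') pairs) acc := by
    apply PySem.List.foldl_congr_mem
    intro pacc p1 hp1
    rcases (PySem.List.mem_enumerate_iff _ _ _).1 hp1 with ⟨k, hk, rfl⟩
    have := pv_outer ids (fun a s2 => pvQA d ids[k] s2 a) k pacc
    simp only [pvQA] at this ⊢
    rw [this]
    congr 2
    omega
  rw [h1]
  exact pv_drop_fold_rows (pvQA d) ids ids 0 acc (by simp)

-- B's recursion over the mapped (id, sequence) list is the tail recursion with body pvQB
theorem pv_B_rows (d : PySem.Dict String String) (ids : List String)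
    (acc : List (String × Int × String × Int)) :
    pvRowsB (ids.map (fun sid => (sid, d.getD sid ""))) acc = pvRowsRec (pvQB d) ids acc := by
  induction ids generalizing acc with
  | nil => rfl
  | cons x xs ih =>
    simp only [List.map_cons, pvRowsB, pvRowsRec]
    rw [ih]
    congr 1
    unfold pvEmitRow
    rw [List.foldl_map]
    rfl

-- the two row bodies agree pointwise
theorem pv_Q_eq (d : PySem.Dict String String) : pvQA d = pvQB d := by
  funext x y acc
  unfold pvQA pvQB pvBucketChars
  exact pv_inner_eq x y (d.getD x "").toList (d.getD y "").toList acc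

-- ===== VERDICT (by name: the statement is the Claim_ definition above) =====
theorem generate_pairs_spec : Claim_equal_generate_pairs := by
  intro alignment _
  unfold Spec_generate_pairs generate_pairs generate_pairs_alt
  rw [pv_A_rows, pv_B_rows, pv_Q_eq]
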